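-- pv_equiv track=rewrite | github.com/Pablosanmar97/electricalsync | src/utilities.py | raster_plot
-- ===== SOURCE A (Python) =====
-- def raster_plot(spike_number, spikes_detect):
-- 	to_subtract = 0
-- 	raster_list = []
-- 	sub_array=[]
-- 	for i in range(len(spike_number)):
-- 		if spike_number[i] == 1:
-- 			if sub_array:
-- 				raster_list.append(sub_array)
-- 			sub_array = []
-- 			to_subtract = spikes_detect[i]
-- 			sub_array.append(spikes_detect[i] - to_subtract)
-- 		else:
-- 			sub_array.append(spikes_detect[i] - to_subtract)
--
-- 	return raster_list
-- ===== SOURCE B (Python) =====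
-- def raster_plot(spike_number, spikes_detect):
--     boundaries = [i for i, v in enumerate(spike_number) if v == 1]
--     if not boundaries:
--         return []
--     out = []
--     lead = [spikes_detect[j] for j in range(0, boundaries[0])]
--     if lead:
--         out.append(lead)
--     for s, t in zip(boundaries, boundaries[1:]):
--         base = spikes_detect[s]
--         out.append([spikes_detect[j] - base for j in range(s, t)])
--     return out
-- ===== Notes on version B (the rewrite author's own statement) =====
-- stated objective: alternative
-- what changed: Replaces A's single running-offset loop with mutable flush state by a boundary decomposition: collect the indices of the 1-spikes once, emit the leading slice, then build each group directly from a consecutive boundary pair, making the dropped final group and the lead rule explicit.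
import Mathlib
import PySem

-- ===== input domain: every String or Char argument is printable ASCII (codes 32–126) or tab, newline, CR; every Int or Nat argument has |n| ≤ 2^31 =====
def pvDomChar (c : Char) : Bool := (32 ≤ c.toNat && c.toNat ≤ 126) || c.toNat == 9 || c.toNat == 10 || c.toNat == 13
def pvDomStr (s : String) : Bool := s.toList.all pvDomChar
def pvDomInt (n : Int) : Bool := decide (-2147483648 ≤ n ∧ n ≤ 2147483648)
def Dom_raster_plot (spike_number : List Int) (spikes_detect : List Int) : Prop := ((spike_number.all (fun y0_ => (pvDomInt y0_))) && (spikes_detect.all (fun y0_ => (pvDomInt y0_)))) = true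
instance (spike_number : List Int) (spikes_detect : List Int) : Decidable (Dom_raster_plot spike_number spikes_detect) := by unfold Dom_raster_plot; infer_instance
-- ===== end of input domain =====

-- B replaces A's running-offset flush loop by a two-phase boundary decomposition (same cost, different structure).

-- B replaces A's single running-offset accumulator loop by a two-phase boundary decomposition (alternative structure, same cost).

-- ===== PORT A =====
-- state = (to_subtract, raster_list, sub_array); loop over range(len(spike_number))
def rasterStepA (spike_number : List Int) (spikes_detect : List Int)
    (st : Int × List (List Int) × List Int) (i : Int) : Int × List (List Int) × List Int :=
  let n := PySem.List.pyGetD spike_number i 0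
  let d := PySem.List.pyGetD spikes_detect i 0
  if n = 1 then
    (d, (if st.2.2 ≠ [] then st.2.1 ++ [st.2.2] else st.2.1), [d - d])
  else
    (st.1, st.2.1, st.2.2 ++ [d - st.1])

def raster_plot (spike_number : List Int) (spikes_detect : List Int) : List (List Int) :=
  ((PySem.List.pyRange 0 (spike_number.length : Int) 1).foldl
      (rasterStepA spike_number spikes_detect) (0, [], [])).2.1

-- ===== PORT B =====
def raster_plot_alt (spike_number : List Int) (spikes_detect : List Int) : List (List Int) :=
  let boundaries := ((PySem.List.enumerate spike_number 0).filter (fun p => p.2 == 1)).map (·.1)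
  match boundaries with
  | [] => []
  | b0 :: rest =>
    let lead := (PySem.List.pyRange 0 b0 1).map (fun j => PySem.List.pyGetD spikes_detect j 0)
    let out := if lead ≠ [] then [lead] else []
    out ++ ((b0 :: rest).zip rest).map (fun p =>
      let base := PySem.List.pyGetD spikes_detect p.1 0
      (PySem.List.pyRange p.1 p.2 1).map (fun j => PySem.List.pyGetD spikes_detect j 0 - base))

-- ===== PRECONDITION & SPEC =====
-- A reads spikes_detect[i] for every i < len(spike_number); when spikes_detect is shorter it raises IndexError — exactly those inputs are excluded.
def Pre_raster_plot (spike_number : List Int) (spikes_detect : List Int) : Prop :=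
  spike_number.length ≤ spikes_detect.length
instance (spike_number : List Int) (spikes_detect : List Int) : Decidable (Pre_raster_plot spike_number spikes_detect) := by unfold Pre_raster_plot; infer_instance

def pvWitness_raster_plot : List Int × List Int := ([1, 0, 0, 1, 0], [3, 5, 8, 11, 12])

def Spec_raster_plot (spike_number : List Int) (spikes_detect : List Int) (out : List (List Int)) : Prop := out = raster_plot_alt spike_number spikes_detect
instance (spike_number : List Int) (spikes_detect : List Int) (out : List (List Int)) : Decidable (Spec_raster_plot spike_number spikes_detect out) := by unfold Spec_raster_plot; infer_instance

-- ===== CLAIM (what is proved, stated in full; the proofs are below) =====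
def Claim_equal_raster_plot : Prop := ∀ (spike_number : List Int) (spikes_detect : List Int), Dom_raster_plot spike_number spikes_detect → Pre_raster_plot spike_number spikes_detect → Spec_raster_plot spike_number spikes_detect (raster_plot spike_number spikes_detect)

-- ===== LEMMAS AND PROOFS =====

-- common recursive description of the grouping
def groups (ts : Int) (acc : List Int) : List (Int × Int) → List (List Int)
  | [] => []
  | (n, d) :: ps =>
      if n = 1 then (if acc ≠ [] then [acc] else []) ++ groups d [d - d] ps
      else groups ts (acc ++ [d - ts]) ps

-- indices of the 1-entries, Nat level
def bnds : List Int → Nat → List Nat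
  | [], _ => []
  | x :: xs, k => if x = 1 then k :: bnds xs (k + 1) else bnds xs (k + 1)

def tailGroups (sd : List Int) (bs : List Nat) : List (List Int) :=
  (bs.zip bs.tail).map (fun p => ((sd.drop p.1).take (p.2 - p.1)).map (· - sd.getD p.1 0))


-- value-level step
def stepV (st : Int × List (List Int) × List Int) (p : Int × Int) : Int × List (List Int) × List Int :=
  if p.1 = 1 then (p.2, (if st.2.2 ≠ [] then st.2.1 ++ [st.2.2] else st.2.1), [p.2 - p.2])
  else (st.1, st.2.1, st.2.2 ++ [p.2 - st.1])

lemma fold_range_zip {σ : Type} (g : σ → Int × Int → σ) :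
    ∀ (sn sd : List Int) (init : σ), sn.length ≤ sd.length →
    (List.range sn.length).foldl (fun st k => g st (sn.getD k 0, sd.getD k 0)) init
      = (sn.zip sd).foldl g init := by
  intro sn
  induction sn with
  | nil => simp
  | cons x sn ih =>
    intro sd init h
    match sd with
    | [] => simp at h
    | y :: sd =>
      simp only [List.length_cons, List.range_succ_eq_map, List.foldl_cons, List.foldl_map,
        List.getD_cons_zero, List.getD_cons_succ, List.zip_cons_cons]
      exact ih sd (g init (x, y)) (by simpa using h)

lemma raster_plot_eq_fold (sn sd : List Int) (h : sn.length ≤ sd.length) :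
    raster_plot sn sd = ((sn.zip sd).foldl stepV (0, [], [])).2.1 := by
  unfold raster_plot
  rw [PySem.List.pyRange_one]
  simp only [Int.sub_zero, Int.toNat_natCast, List.foldl_map]
  have e := PySem.List.foldl_congr_mem (List.range sn.length)
    (fun st k => rasterStepA sn sd st (0 + (k : Int)))
    (fun st k => stepV st (sn.getD k 0, sd.getD k 0))
    ((0 : Int), ([] : List (List Int)), ([] : List Int))
    (by intro acc x hx; simp [rasterStepA, stepV, PySem.List.pyGetD_natCast])
  rw [e, fold_range_zip stepV sn sd _ h]

lemma fold_inv : ∀ (ps : List (Int × Int)) (ts : Int) (acc : List Int) (rl : List (List Int)),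
    ((ps.foldl stepV (ts, rl, acc)).2.1) = rl ++ groups ts acc ps := by
  intro ps
  induction ps with
  | nil => simp [groups]
  | cons p ps ih =>
    intro ts acc rl
    simp only [List.foldl_cons, stepV, groups]
    by_cases h1 : p.1 = 1
    · simp only [h1]
      by_cases h2 : acc = [] <;> simp [h2, ih, List.append_assoc]
    · simp [h1, ih]

-- bnds shift
lemma bnds_shift : ∀ (xs : List Int) (k : Nat), bnds xs (k+1) = (bnds xs k).map (· + 1) := by
  intro xs
  induction xs with
  | nil => intro k; rfl
  | cons x xs ih =>
    intro k
    by_cases h : x = 1 <;> simp [bnds, h, ih]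

lemma mem_bnds : ∀ (xs : List Int) (k i : Nat), i ∈ bnds xs k → k ≤ i ∧ i < k + xs.length := by
  intro xs
  induction xs with
  | nil => intro k i h; simp [bnds] at h
  | cons x xs ih =>
    intro k i h
    simp only [List.length_cons]
    by_cases hx : x = 1 <;> simp only [bnds, hx, if_pos, ite_false, List.mem_cons] at h
    · rcases h with rfl | h
      · omega
      · have := ih (k+1) i h; omega
    · have := ih (k+1) i h; omega

lemma tailGroups_shift (y : Int) (sd : List Int) (bs : List Nat) :
    tailGroups (y :: sd) (bs.map (· + 1)) = tailGroups sd bs := by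
  unfold tailGroups
  rw [← List.map_tail, List.zip_map, List.map_map]
  apply List.map_congr_left
  intro p _
  simp [Prod.map]

lemma tailGroups_cons_cons (sd : List Int) (a b : Nat) (l : List Nat) :
    tailGroups sd (a :: b :: l) = (((sd.drop a).take (b - a)).map (· - sd.getD a 0)) :: tailGroups sd (b :: l) := by
  simp [tailGroups]

lemma core : ∀ (sn sd : List Int) (ts : Int) (acc : List Int), sn.length ≤ sd.length →
    groups ts acc (sn.zip sd) =
      match bnds sn 0 with
      | [] => []
      | b0 :: rest =>
        (if acc ++ (sd.take b0).map (· - ts) ≠ [] then [acc ++ (sd.take b0).map (· - ts)] else [])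
          ++ tailGroups sd (b0 :: rest) := by
  intro sn
  induction sn with
  | nil => intro sd ts acc h; simp [bnds, groups]
  | cons x sn ih =>
    intro sd ts acc h
    match sd with
    | [] => simp at h
    | y :: sd =>
      have h' : sn.length ≤ sd.length := by simpa using h
      by_cases hx : x = 1
      · -- boundary at 0
        simp only [hx, List.zip_cons_cons, groups, bnds, bnds_shift, if_true]
        rw [ih sd y [y - y] h']
        rcases hb : bnds sn 0 with _ | ⟨b0, rest⟩
        · simp [tailGroups]
        · have hsh := tailGroups_shift y sd (b0 :: rest)
          simp only [List.map_cons] at hsh ⊢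
          rw [tailGroups_cons_cons, hsh]
          simp [List.take_succ_cons]
      · simp only [List.zip_cons_cons, groups, bnds, if_neg hx, bnds_shift]
        rw [ih sd ts (acc ++ [y - ts]) h']
        rcases hb : bnds sn 0 with _ | ⟨b0, rest⟩
        · simp
        · have hsh := tailGroups_shift y sd (b0 :: rest)
          simp only [List.map_cons] at hsh ⊢
          rw [hsh]
          simp [List.take_succ_cons, List.append_assoc]

lemma bnds_enum : ∀ (sn : List Int) (k : Nat),
    ((PySem.List.enumerate sn (k : Int)).filter (fun p => p.2 == 1)).map (·.1)
      = (bnds sn k).map ((Nat.cast : Nat → Int)) := by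
  intro sn
  induction sn with
  | nil => intro k; rfl
  | cons x sn ih =>
    intro k
    rw [PySem.List.enumerate_cons, List.filter_cons]
    by_cases hx : x = 1
    · rw [if_pos (by simp [hx]), List.map_cons,
        show ((k : Int) + 1) = ((k + 1 : Nat) : Int) by push_cast; ring, ih (k + 1)]
      simp [bnds, hx]
    · rw [if_neg (by simp [hx]),
        show ((k : Int) + 1) = ((k + 1 : Nat) : Int) by push_cast; ring, ih (k + 1)]
      simp [bnds, hx]

lemma map_pyGetD_range_take (sd : List Int) (s t : Nat) (ht : t ≤ sd.length) :
    (PySem.List.pyRange (s : Int) (t : Int) 1).map (fun j => PySem.List.pyGetD sd j 0)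
      = (sd.drop s).take (t - s) := by
  rw [PySem.List.pyRange_one, List.map_map]
  by_cases hst : s ≤ t
  · apply List.ext_getElem
    · simp; omega
    · intro i h1 h2
      have hi : i < t - s := by
        have := h2; simp only [List.length_take, List.length_drop, lt_min_iff] at this
        exact this.1
      have : ((s : Int) + ((i : Nat) : Int)) = ((s + i : Nat) : Int) := by push_cast; ring
      simp only [Function.comp, List.getElem_map, List.getElem_range, this,
        PySem.List.pyGetD_natCast, List.getElem_take, List.getElem_drop]
      rw [List.getD_eq_getElem]
  · have : ((t : Int) - (s : Int)).toNat = 0 := by omega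
    have h2 : t - s = 0 := by omega
    simp [this, h2]

lemma final (sn sd : List Int) (hpre : sn.length ≤ sd.length) :
    raster_plot sn sd = raster_plot_alt sn sd := by
  have hlen : ∀ i ∈ bnds sn 0, i < sd.length := by
    intro i hi
    have := (mem_bnds sn 0 i hi).2
    omega
  rw [raster_plot_eq_fold sn sd hpre, fold_inv _ 0 [] [], core sn sd 0 [] hpre]
  unfold raster_plot_alt
  have hb := bnds_enum sn 0
  simp only [Nat.cast_zero] at hb
  simp only [hb]
  rcases hB : bnds sn 0 with _ | ⟨b0, rest⟩
  · simp
  · simp only [List.map_cons, List.nil_append]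
    have hb0 : b0 ∈ bnds sn 0 := by rw [hB]; exact List.mem_cons_self
    have hlead : (PySem.List.pyRange 0 (b0 : Int) 1).map (fun j => PySem.List.pyGetD sd j 0)
        = sd.take b0 := by
      have := map_pyGetD_range_take sd 0 b0 (le_of_lt (hlen b0 hb0))
      simpa using this
    rw [hlead]
    have hzip : ((b0 : Int) :: rest.map ((Nat.cast : Nat → Int))).zip (rest.map ((Nat.cast : Nat → Int)))
        = ((b0 :: rest).zip rest).map (Prod.map (Nat.cast : Nat → Int) (Nat.cast : Nat → Int)) := by
      rw [← List.map_cons, List.zip_map]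
    rw [hzip, List.map_map]
    have hmap : (((b0 :: rest).zip rest).map
        ((fun p => ((PySem.List.pyRange p.1 p.2 1).map
            (fun j => PySem.List.pyGetD sd j 0 - PySem.List.pyGetD sd p.1 0)))
          ∘ Prod.map ((Nat.cast : Nat → Int)) ((Nat.cast : Nat → Int))))
        = tailGroups sd (b0 :: rest) := by
      unfold tailGroups
      apply List.map_congr_left
      intro p hp
      obtain ⟨h1, h2⟩ := List.of_mem_zip hp
      have ht : p.2 ≤ sd.length := le_of_lt (hlen p.2 (by rw [hB]; exact List.mem_cons_of_mem _ h2))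
      have e1 : (PySem.List.pyRange (p.1 : Int) (p.2 : Int) 1).map
          (fun j => PySem.List.pyGetD sd j 0 - PySem.List.pyGetD sd (p.1 : Int) 0)
          = ((PySem.List.pyRange (p.1 : Int) (p.2 : Int) 1).map
              (fun j => PySem.List.pyGetD sd j 0)).map (· - sd.getD p.1 0) := by
        rw [List.map_map]
        simp [Function.comp, PySem.List.pyGetD_natCast]
      simp only [Function.comp, Prod.map]
      rw [e1, map_pyGetD_range_take sd p.1 p.2 ht]
    rw [hmap]
    simp

-- ===== VERDICT (by name: the statement is the Claim_ definition above) =====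
theorem raster_plot_spec : Claim_equal_raster_plot := by
  intro sn sd _ hpre
  unfold Spec_raster_plot
  exact final sn sd hpre
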